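-- pv_equiv track=rewrite | github.com/sashaprovorova/CMPSC131-132 | finalproject.py | nearprime
-- ===== SOURCE A (Python) =====
-- def nearprime(num2):
--
--     num2=int(num2)
--     isnearprime=False
--     temp=0
--
--     for k in range (2, num2):
--         if num2%k==0:
--             temp+=1
--
--     if temp==1 or temp==0 or temp==2:
--         isnearprime=True
--
--     return(isnearprime)
-- ===== SOURCE B (Python) =====
-- def nearprime(num2):
--     num2 = int(num2)
--     cnt = 0
--     d = 2
--     while d * d <= num2:
--         if num2 % d == 0:
--             cnt += 1 if d * d == num2 else 2
--         d += 1
--     return cnt <= 2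
-- ===== Notes on version B (the rewrite author's own statement) =====
-- stated objective: faster
-- what changed: A scans every candidate divisor below n; B trial-divides only up to the square root of n, counting each divisor together with its cofactor, and checks the same near-prime bound on the count.
import Mathlib
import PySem

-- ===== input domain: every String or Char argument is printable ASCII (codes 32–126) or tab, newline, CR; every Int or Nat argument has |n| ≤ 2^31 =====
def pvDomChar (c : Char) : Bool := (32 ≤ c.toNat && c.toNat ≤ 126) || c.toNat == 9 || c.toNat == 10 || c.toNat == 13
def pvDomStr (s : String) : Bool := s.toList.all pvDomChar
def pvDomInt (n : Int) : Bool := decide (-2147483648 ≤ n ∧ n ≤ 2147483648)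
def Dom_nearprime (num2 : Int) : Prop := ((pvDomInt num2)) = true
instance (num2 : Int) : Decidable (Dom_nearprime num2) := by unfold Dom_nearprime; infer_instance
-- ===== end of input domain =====

-- B replaces A's scan of all candidate divisors 2..n-1 by trial division up to √n,
-- counting each divisor pair (d, n/d) at once.

-- ===== PORT A =====
-- for k in range(2, num2): if num2 % k == 0: temp += 1; then isnearprime iff temp in {1,0,2}
def nearprime (num2 : Int) : Bool :=
  let temp : Int :=
    (PySem.List.pyRange 2 num2 1).foldl
      (fun temp k => if PySem.Int.mod num2 k == 0 then temp + 1 else temp) 0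
  if temp == 1 || temp == 0 || temp == 2 then true else false

-- ===== PORT B =====
-- termination of B's while loop: d*d <= num2 forces d <= num2, so num2+1-d shrinks
theorem pvLoopDec (num2 d : Int) (h : d * d ≤ num2) :
    (num2 + 1 - (d + 1)).toNat < (num2 + 1 - d).toNat := by
  have hd : d ≤ num2 := by
    rcases le_total d 0 with h0 | h0
    · nlinarith
    · nlinarith
  omega

-- while d*d <= num2: if num2 % d == 0: cnt += 1 if d*d == num2 else 2; d += 1
def nearprimeLoop (num2 d cnt : Int) : Int :=
  if h : d * d ≤ num2 then
    nearprimeLoop num2 (d + 1)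
      (if PySem.Int.mod num2 d == 0 then (if d * d == num2 then cnt + 1 else cnt + 2) else cnt)
  else cnt
termination_by (num2 + 1 - d).toNat
decreasing_by exact pvLoopDec num2 d h

def nearprime_alt (num2 : Int) : Bool :=
  decide (nearprimeLoop num2 2 0 ≤ 2)

-- ===== PRECONDITION & SPEC =====
def Spec_nearprime (num2 : Int) (out : Bool) : Prop := out = nearprime_alt num2
instance (num2 : Int) (out : Bool) : Decidable (Spec_nearprime num2 out) := by unfold Spec_nearprime; infer_instance

-- ===== CLAIM (what is proved, stated in full; the proofs are below) =====
def Claim_equal_nearprime : Prop := ∀ (num2 : Int), Dom_nearprime num2 → Spec_nearprime num2 (nearprime num2)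

-- ===== LEMMAS AND PROOFS =====

-- the divisors of n that A's loop counts
noncomputable def pvDivs (n : Int) : Finset Int := (Finset.Ico 2 n).filter (fun e => n % e = 0)

-- the divisors of n still to be counted by B's loop at position d: e ∣ n with d ≤ e ≤ n / d
noncomputable def pvS (n d : Int) : Finset Int := (Finset.Ico d (n / d + 1)).filter (fun e => n % e = 0)

theorem pvS_mem (n d e : Int) (hd : 0 < d) :
    e ∈ pvS n d ↔ d ≤ e ∧ e * d ≤ n ∧ e ∣ n := by
  simp only [pvS, Finset.mem_filter, Finset.mem_Ico, Int.lt_add_one_iff,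
    Int.le_ediv_iff_mul_le hd, PySem.Int.emod_eq_zero_iff_dvd]
  tauto

theorem pvS_empty (n d : Int) (hd : 2 ≤ d) (h : n < d * d) : pvS n d = ∅ := by
  ext e
  rw [pvS_mem n d e (by omega)]
  simp only [Finset.notMem_empty, iff_false]
  rintro ⟨h1, h2, -⟩
  nlinarith

theorem pvS_step (n d : Int) (hd : 2 ≤ d) (h : d * d ≤ n) :
    (pvS n d).card =
      (pvS n (d + 1)).card + (if d ∣ n then (if d * d = n then 1 else 2) else 0) := by
  by_cases hdvd : d ∣ n
  · obtain ⟨q, hq⟩ := id hdvd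
    have hq2 : d ≤ q := by nlinarith
    by_cases heq : d * d = n
    · -- n is a perfect square: only d itself remains; the rest is empty
      have h1 : pvS n d = {d} := by
        ext e
        rw [pvS_mem n d e (by omega)]
        simp only [Finset.mem_singleton]
        constructor
        · rintro ⟨h1, h2, -⟩
          nlinarith
        · intro he
          subst he
          exact ⟨le_rfl, h, ⟨e, heq.symm⟩⟩
      have h2 : pvS n (d + 1) = ∅ := by
        apply pvS_empty n (d + 1) (by omega)
        nlinarith
      simp [h1, h2, hdvd, heq]
    · -- two distinct divisors d and q = n / d are removed
      have hq3 : d < q := by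
        rcases lt_or_eq_of_le hq2 with h' | h'
        · exact h'
        · exact absurd (by rw [hq, ← h'] : d * d = n) heq
      have hmain : pvS n d = insert d (insert q (pvS n (d + 1))) := by
        ext e
        rw [pvS_mem n d e (by omega)]
        simp only [Finset.mem_insert, pvS_mem n (d + 1) e (by omega)]
        constructor
        · rintro ⟨h1, h2, he⟩
          by_cases hed : e = d
          · exact Or.inl hed
          obtain ⟨f, hf⟩ := he
          have he0 : 0 < e := by omega
          have hfd : d ≤ f := by nlinarith
          by_cases hfdq : f = d
          · right; left
            have h' : e * d = q * d := by
              have : d * q = e * d := by rw [← hq, hf, hfdq]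
              linarith [this]
            exact mul_right_cancel₀ (by omega) h'
          · right; right
            refine ⟨by omega, ?_, ⟨f, hf⟩⟩
            nlinarith [show d + 1 ≤ f by omega]
        · rintro (rfl | rfl | ⟨h1, h2, he⟩)
          · exact ⟨le_rfl, h, hdvd⟩
          · exact ⟨by omega, by nlinarith, ⟨d, by linarith [hq]⟩⟩
          · exact ⟨by omega, by nlinarith, he⟩
      have hqnot : q ∉ pvS n (d + 1) := by
        rw [pvS_mem n (d + 1) q (by omega)]
        rintro ⟨-, h2, -⟩
        nlinarith
      have hdnot : d ∉ insert q (pvS n (d + 1)) := by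
        simp only [Finset.mem_insert, pvS_mem n (d + 1) d (by omega)]
        rintro (h' | ⟨h1, -, -⟩)
        · exact absurd h' (by omega)
        · omega
      rw [hmain, Finset.card_insert_of_notMem hdnot, Finset.card_insert_of_notMem hqnot,
        if_pos hdvd, if_neg heq]
  · -- d does not divide n: nothing is removed
    have heq : pvS n d = pvS n (d + 1) := by
      ext e
      rw [pvS_mem n d e (by omega), pvS_mem n (d + 1) e (by omega)]
      constructor
      · rintro ⟨h1, h2, he⟩
        have hed : e ≠ d := fun he' => hdvd (he' ▸ he)
        obtain ⟨f, hf⟩ := he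
        have he0 : 0 < e := by omega
        have hfd : d ≤ f := by nlinarith
        have hfd' : d + 1 ≤ f := by
          rcases lt_or_eq_of_le hfd with h' | h'
          · omega
          · exact absurd ⟨e, by rw [hf, ← h', mul_comm]⟩ hdvd
        exact ⟨by omega, by nlinarith, ⟨f, hf⟩⟩
      · rintro ⟨h1, h2, he⟩
        exact ⟨by omega, by nlinarith, he⟩
    simp [heq, hdvd]

theorem pvLoop_eq (n : Int) :
    ∀ (k : Nat) (d cnt : Int), (n + 1 - d).toNat = k → 2 ≤ d →
      nearprimeLoop n d cnt = cnt + (pvS n d).card := by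
  intro k
  induction k with
  | zero =>
    intro d cnt hk hd
    have hnd : ¬ d * d ≤ n := by nlinarith [show n < d by omega]
    rw [nearprimeLoop, dif_neg hnd, pvS_empty n d hd (by nlinarith [show n < d by omega])]
    simp
  | succ k ih =>
    intro d cnt hk hd
    by_cases hc : d * d ≤ n
    · have hdn : d ≤ n := by nlinarith
      rw [nearprimeLoop, dif_pos hc,
        ih (d + 1) _ (by omega) (by omega),
        pvS_step n d hd hc]
      by_cases hdvd : d ∣ n
      · have hm : PySem.Int.mod n d = 0 := (PySem.Int.mod_eq_zero_iff_dvd n d).mpr hdvd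
        by_cases heq : d * d = n
        · simp [hm, heq, hdvd]
          ring
        · have hb : (d * d == n) = false := by simp [heq]
          simp [hm, hb, hdvd, heq]
          ring
      · have hm : (PySem.Int.mod n d == 0) = false := by
          simp only [beq_eq_false_iff_ne, ne_eq]
          exact fun h' => hdvd ((PySem.Int.mod_eq_zero_iff_dvd n d).mp h')
        simp [hm, hdvd]
    · rw [nearprimeLoop, dif_neg hc, pvS_empty n d hd (by omega)]
      simp

theorem pvS_start (n : Int) : pvS n 2 = pvDivs n := by
  ext e
  rw [pvS_mem n 2 e (by omega)]
  simp only [pvDivs, Finset.mem_filter, Finset.mem_Ico, PySem.Int.emod_eq_zero_iff_dvd]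
  constructor
  · rintro ⟨h1, h2, he⟩
    exact ⟨⟨h1, by nlinarith⟩, he⟩
  · rintro ⟨⟨h1, h2⟩, he⟩
    obtain ⟨f, hf⟩ := id he
    have he0 : 0 < e := by omega
    have hf1 : 1 ≤ f := by nlinarith
    have hf2 : 2 ≤ f := by
      rcases lt_or_eq_of_le hf1 with h' | h'
      · omega
      · exact absurd (by rw [hf, ← h', mul_one] : n = e) (by omega)
    exact ⟨h1, by nlinarith, he⟩

theorem pvCount_eq (n : Int) :
    ∀ (k : Nat) (a b : Int), (b - a).toNat = k →
      (PySem.List.pyRange a b 1).countP (fun j => PySem.Int.mod n j == 0) =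
        ((Finset.Ico a b).filter (fun e => n % e = 0)).card := by
  intro k
  induction k with
  | zero =>
    intro a b hk
    rw [PySem.List.pyRange_one_eq_nil (by omega)]
    rw [show Finset.Ico a b = ∅ from Finset.Ico_eq_empty (by omega)]
    simp
  | succ k ih =>
    intro a b hk
    have hab : a < b := by omega
    rw [PySem.List.pyRange_one_cons hab, List.countP_cons, ih (a + 1) b (by omega)]
    have hsplit : Finset.Ico a b = insert a (Finset.Ico (a + 1) b) := by
      ext x; simp only [Finset.mem_Ico, Finset.mem_insert]; omega
    rw [hsplit, Finset.filter_insert]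
    by_cases hdvd : a ∣ n
    · have hm : PySem.Int.mod n a = 0 := (PySem.Int.mod_eq_zero_iff_dvd n a).mpr hdvd
      rw [if_pos ((PySem.Int.emod_eq_zero_iff_dvd n a).mpr hdvd),
        Finset.card_insert_of_notMem (by simp [Finset.mem_Ico])]
      simp [hm]
    · have hm : (PySem.Int.mod n a == 0) = false := by
        simp only [beq_eq_false_iff_ne, ne_eq]
        exact fun h' => hdvd ((PySem.Int.mod_eq_zero_iff_dvd n a).mp h')
      rw [if_neg (fun h' => hdvd ((PySem.Int.emod_eq_zero_iff_dvd n a).mp h'))]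
      simp [hm]

-- ===== VERDICT (by name: the statement is the Claim_ definition above) =====
theorem nearprime_spec : Claim_equal_nearprime := by
  intro num2 _
  show nearprime num2 = nearprime_alt num2
  by_cases hn : num2 < 2
  · have hA : nearprime num2 = true := by
      rw [nearprime]
      rw [PySem.List.pyRange_one_eq_nil (by omega)]
      simp
    have hB : nearprime_alt num2 = true := by
      rw [nearprime_alt, nearprimeLoop, dif_neg (by omega : ¬ (2 : Int) * 2 ≤ num2)]
      simp
    rw [hA, hB]
  · rw [nearprime_alt, pvLoop_eq num2 (num2 - 1).toNat 2 0 (by omega) (by omega),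
      pvS_start num2, zero_add]
    rw [nearprime]
    rw [PySem.List.foldl_count_if, pvCount_eq num2 (num2 - 2).toNat 2 num2 rfl]
    unfold pvDivs
    apply Bool.eq_iff_iff.mpr
    simp only [zero_add, Bool.if_true_left, Bool.or_eq_true,
      beq_iff_eq, decide_eq_true_eq, Bool.false_eq_true, or_false]
    omega
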